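-- pv_equiv track=rewrite | github.com/Kimuksung/codewars-programmers | Hyundae [21년 재직자 대회 예선] 회의실 예약.py | available_room
-- ===== SOURCE A (Python) =====
-- def available_room(data):
--     answer = []
--     check = False
--     temp = []
--     for i in range(len(data)):
--         if data[i] and not check:
--             check=True
--             temp.append(i)
--
--         if not data[i] and check :
--             temp.append(i)
--             check=False
--             answer.append(temp)
--             temp=[]
--
--     if check :
--         temp.append(len(data))
--         answer.append(temp)
--     return len(answer) , [ (a+9,b+9) for a,b in answer ] , list(map( lambda x:(x[0]+9,x[1]+9), answer))
-- ===== SOURCE B (Python) =====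
-- def available_room(data):
--     # Run-based scan: repeatedly split off the leading run (takewhile-style)
--     # instead of a flag-driven per-index loop.
--     intervals = []
--     pos = 0
--     rest = list(data)
--     while rest:
--         if rest[0]:
--             run = len(rest)
--             for k, v in enumerate(rest):
--                 if not v:
--                     run = k
--                     break
--             intervals.append((pos + 9, pos + run + 9))
--             rest = rest[run:]
--             pos += run
--         else:
--             rest = rest[1:]
--             pos += 1
--     return len(intervals), intervals, list(intervals)
-- ===== Notes on version B (the rewrite author's own statement) =====
-- stated objective: simpler
-- what changed: Replaced A's flag-and-temp-list per-index state machine (plus post-loop clamp) by a run-splitting scan that takes each maximal truthy run off the front and emits its interval directly, with no boolean flag, no pending temp list and no final fix-up.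
import Mathlib
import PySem

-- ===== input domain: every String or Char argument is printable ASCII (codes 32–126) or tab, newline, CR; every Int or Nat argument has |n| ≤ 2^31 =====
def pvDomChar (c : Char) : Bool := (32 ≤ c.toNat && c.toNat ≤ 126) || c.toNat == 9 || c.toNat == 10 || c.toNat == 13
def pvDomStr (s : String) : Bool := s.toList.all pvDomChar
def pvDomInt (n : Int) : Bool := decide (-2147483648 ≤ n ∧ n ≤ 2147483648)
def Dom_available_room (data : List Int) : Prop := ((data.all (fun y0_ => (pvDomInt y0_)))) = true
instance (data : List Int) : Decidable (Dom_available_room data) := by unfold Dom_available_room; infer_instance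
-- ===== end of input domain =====

-- B replaces A's flag-and-temp state machine (with post-loop clamp) by a run-splitting scan
-- that takes each maximal truthy run off the front and emits its interval directly (objective: simpler).

-- ===== PORT A =====
-- unpacking 'a, b = entry' of a 2-element list (A's answer entries always have exactly 2 elements)
def pvConv (l : List Int) : Int × Int := (l.getD 0 0 + 9, l.getD 1 0 + 9)

-- one iteration of A's for-body: the two sequential ifs, in order, on state (answer, check, temp)
def aStep (st : List (List Int) × Bool × List Int) (p : Int × Int) : List (List Int) × Bool × List Int :=
  let i := p.1
  let x := p.2
  let answer := st.1
  let check := st.2.1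
  let temp := st.2.2
  -- if data[i] and not check: check = True; temp.append(i)
  let ct : Bool × List Int := if x ≠ 0 ∧ check = false then (true, temp ++ [i]) else (check, temp)
  -- if not data[i] and check: temp.append(i); check = False; answer.append(temp); temp = []
  if x = 0 ∧ ct.1 = true then (answer ++ [ct.2 ++ [i]], false, ([] : List Int))
  else (answer, ct.1, ct.2)

def available_room (data : List Int) : Int × (List (Int × Int)) × (List (Int × Int)) :=
  -- 'for i in range(len(data)): … data[i] …' ported as a fold over enumerate(data) (i is always in range)
  let st := (PySem.List.enumerate data 0).foldl aStep ([], false, [])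
  -- if check: temp.append(len(data)); answer.append(temp)
  let answer := if st.2.1 = true then st.1 ++ [st.2.2 ++ [(data.length : Int)]] else st.1
  ((answer.length : Int),
   answer.map pvConv,   -- [ (a+9, b+9) for a, b in answer ]
   answer.map pvConv)   -- list(map(lambda x: (x[0]+9, x[1]+9), answer))

-- ===== PORT B =====
-- run-splitting scan: Source B's inner run-measuring loop / slicing are takeWhile / dropWhile
def pvIntervals (l : List Int) (pos : Int) : List (Int × Int) :=
  match l with
  | [] => []
  | x :: rest =>
    if hx : x ≠ 0 then
      let run : Int := (((x :: rest).takeWhile (fun y => y ≠ 0)).length : Int)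
      (pos + 9, pos + run + 9) ::
        pvIntervals ((x :: rest).dropWhile (fun y => y ≠ 0)) (pos + run)
    else pvIntervals rest (pos + 1)
termination_by l.length
decreasing_by
  · rw [List.dropWhile_cons_of_pos (by simpa using hx)]
    exact Nat.lt_succ_of_le (List.length_dropWhile_le (fun y => decide (y ≠ 0)) rest)
  · simp

def available_room_alt (data : List Int) : Int × (List (Int × Int)) × (List (Int × Int)) :=
  let iv := pvIntervals data 0
  ((iv.length : Int), iv, iv)

-- ===== PRECONDITION & SPEC =====
def Spec_available_room (data : List Int) (out : Int × (List (Int × Int)) × (List (Int × Int))) : Prop := out = available_room_alt data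
instance (data : List Int) (out : Int × (List (Int × Int)) × (List (Int × Int))) : Decidable (Spec_available_room data out) := by unfold Spec_available_room; infer_instance

-- ===== CLAIM (what is proved, stated in full; the proofs are below) =====
def Claim_equal_available_room : Prop := ∀ (data : List Int), Dom_available_room data → Spec_available_room data (available_room data)

-- ===== LEMMAS AND PROOFS =====

-- A's loop as structural recursion on the remaining list (i = absolute index of the head)
def aGo : List Int → Int → List (List Int) → Bool → List Int → List (List Int) × Bool × List Int
  | [], _, ans, check, temp => (ans, check, temp)
  | x :: rest, i, ans, check, temp =>
    let st := aStep (ans, check, temp) (i, x)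
    aGo rest (i + 1) st.1 st.2.1 st.2.2

-- A's post-loop clamp applied to a final state, with f = len(data)
def pvFinish (st : List (List Int) × Bool × List Int) (f : Int) : List (List Int) :=
  if st.2.1 = true then st.1 ++ [st.2.2 ++ [f]] else st.1

-- reference: element-wise interval builder with an optional open start
def ivs : List Int → Int → Option Int → List (Int × Int)
  | [], _, none => []
  | [], i, some s => [(s + 9, i + 9)]
  | x :: rest, i, none => if x ≠ 0 then ivs rest (i + 1) (some i) else ivs rest (i + 1) none
  | x :: rest, i, some s => if x = 0 then (s + 9, i + 9) :: ivs rest (i + 1) none else ivs rest (i + 1) (some s)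

theorem foldl_aStep (data : List Int) : ∀ (i : Int) (st : List (List Int) × Bool × List Int),
    (PySem.List.enumerate data i).foldl aStep st = aGo data i st.1 st.2.1 st.2.2 := by
  induction data with
  | nil => intro i st; simp [PySem.List.enumerate_nil, aGo]
  | cons x rest ih =>
    intro i st
    simp only [PySem.List.enumerate_cons, List.foldl_cons, aGo, ih]

theorem ivs_run (data : List Int) : ∀ (i s : Int),
    ivs data i (some s)
      = (s + 9, (i + ((data.takeWhile (fun y => y ≠ 0)).length : Int)) + 9)
        :: ivs (data.dropWhile (fun y => y ≠ 0)) (i + ((data.takeWhile (fun y => y ≠ 0)).length : Int)) none := by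
  induction data with
  | nil => intro i s; simp [ivs]
  | cons x rest ih =>
    intro i s
    by_cases hx : x = 0
    · simp [ivs, hx]
    · have h1 : ivs (x :: rest) i (some s) = ivs rest (i + 1) (some s) := by simp [ivs, hx]
      rw [h1, ih]
      simp only [List.takeWhile_cons, List.dropWhile_cons, decide_eq_true_eq]
      simp only [if_pos hx, List.length_cons]
      have he : i + (((List.takeWhile (fun y => decide (y ≠ 0)) rest).length + 1 : Nat) : Int)
          = (i + 1) + ((List.takeWhile (fun y => decide (y ≠ 0)) rest).length : Int) := by
        push_cast; ring
      rw [he]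

theorem pvIntervals_eq_ivs (l : List Int) (pos : Int) : pvIntervals l pos = ivs l pos none := by
  induction l, pos using pvIntervals.induct with
  | case1 pos => simp [pvIntervals, ivs]
  | case2 pos x rest hx run ih =>
    rw [pvIntervals]
    rw [dif_pos hx]
    show (pos + 9, pos + (((x :: rest).takeWhile (fun y => y ≠ 0)).length : Int) + 9)
        :: pvIntervals ((x :: rest).dropWhile (fun y => y ≠ 0))
            (pos + (((x :: rest).takeWhile (fun y => y ≠ 0)).length : Int))
      = ivs (x :: rest) pos none
    rw [ih]
    have h1 : ivs (x :: rest) pos none = ivs rest (pos + 1) (some pos) := by simp [ivs, hx]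
    rw [h1, ivs_run rest (pos + 1) pos]
    simp only [List.takeWhile_cons, List.dropWhile_cons, decide_eq_true_eq, if_pos hx,
      List.length_cons, run]
    have he : pos + (((List.takeWhile (fun y => decide (y ≠ 0)) rest).length + 1 : Nat) : Int)
        = (pos + 1) + ((List.takeWhile (fun y => decide (y ≠ 0)) rest).length : Int) := by
      push_cast; ring
    rw [he]
  | case3 pos x rest hx ih =>
    have hx0 : x = 0 := by by_contra h; exact hx h
    rw [pvIntervals, dif_neg hx]
    rw [ih]
    simp [ivs, hx0]

theorem aGo_inv (data : List Int) : ∀ (i : Int) (ans : List (List Int)) (o : Option Int),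
    (pvFinish (aGo data i ans o.isSome o.toList) (i + (data.length : Int))).map pvConv
      = ans.map pvConv ++ ivs data i o := by
  induction data with
  | nil =>
    intro i ans o
    cases o with
    | none => simp [aGo, pvFinish, ivs]
    | some s => simp [aGo, pvFinish, ivs, pvConv]
  | cons x rest ih =>
    intro i ans o
    have hlen : i + ((x :: rest).length : Int) = (i + 1) + (rest.length : Int) := by
      simp; ring
    cases o with
    | none =>
      simp only [Option.isSome_none, Option.toList_none]
      by_cases hx : x = 0
      · have step : aStep (ans, false, []) (i, x) = (ans, false, []) := by simp [aStep, hx]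
        rw [show aGo (x :: rest) i ans false []
            = aGo rest (i + 1) (aStep (ans, false, []) (i, x)).1 (aStep (ans, false, []) (i, x)).2.1
                (aStep (ans, false, []) (i, x)).2.2 from rfl, step]
        rw [hlen]
        have h := ih (i + 1) ans none
        simp only [Option.isSome_none, Option.toList_none] at h
        rw [h]
        simp [ivs, hx]
      · have step : aStep (ans, false, []) (i, x) = (ans, true, [i]) := by simp [aStep, hx]
        rw [show aGo (x :: rest) i ans false []
            = aGo rest (i + 1) (aStep (ans, false, []) (i, x)).1 (aStep (ans, false, []) (i, x)).2.1
                (aStep (ans, false, []) (i, x)).2.2 from rfl, step]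
        rw [hlen]
        have h := ih (i + 1) ans (some i)
        simp only [Option.isSome_some, Option.toList_some] at h
        rw [h]
        simp [ivs, hx]
    | some s =>
      simp only [Option.isSome_some, Option.toList_some]
      by_cases hx : x = 0
      · have step : aStep (ans, true, [s]) (i, x) = (ans ++ [[s] ++ [i]], false, []) := by
          simp [aStep, hx]
        rw [show aGo (x :: rest) i ans true [s]
            = aGo rest (i + 1) (aStep (ans, true, [s]) (i, x)).1 (aStep (ans, true, [s]) (i, x)).2.1
                (aStep (ans, true, [s]) (i, x)).2.2 from rfl, step]
        rw [hlen]
        have h := ih (i + 1) (ans ++ [[s] ++ [i]]) none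
        simp only [Option.isSome_none, Option.toList_none] at h
        rw [h]
        simp [ivs, hx, pvConv]
      · have step : aStep (ans, true, [s]) (i, x) = (ans, true, [s]) := by simp [aStep, hx]
        rw [show aGo (x :: rest) i ans true [s]
            = aGo rest (i + 1) (aStep (ans, true, [s]) (i, x)).1 (aStep (ans, true, [s]) (i, x)).2.1
                (aStep (ans, true, [s]) (i, x)).2.2 from rfl, step]
        rw [hlen]
        have h := ih (i + 1) ans (some s)
        simp only [Option.isSome_some, Option.toList_some] at h
        rw [h]
        simp [ivs, hx]

-- ===== VERDICT (by name: the statement is the Claim_ definition above) =====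
theorem available_room_spec : Claim_equal_available_room := by
  intro data _
  unfold Spec_available_room available_room available_room_alt
  rw [foldl_aStep]
  have h := aGo_inv data 0 [] none
  simp only [Option.isSome_none, Option.toList_none, List.map_nil, List.nil_append] at h
  rw [pvIntervals_eq_ivs]
  have hfin : (if (aGo data 0 [] false []).2.1 = true
      then (aGo data 0 [] false []).1 ++ [(aGo data 0 [] false []).2.2 ++ [(data.length : Int)]]
      else (aGo data 0 [] false []).1)
      = pvFinish (aGo data 0 [] false []) (0 + (data.length : Int)) := by
    simp [pvFinish]
  simp only [hfin]
  have hl : ((pvFinish (aGo data 0 [] false []) (0 + (data.length : Int))).length : Int)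
      = (((pvFinish (aGo data 0 [] false []) (0 + (data.length : Int))).map pvConv).length : Int) := by
    simp
  rw [hl, h]
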